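-- pv_equiv track=rewrite | github.com/AbdullahHassan192/CS-417-Project | analysis/research_analysis.py | _possible_supervision_pattern
-- ===== SOURCE A (Python) =====
-- from collections import Counter, defaultdict
-- from typing import Any, Dict, List, Optional, Tuple
--
-- def _possible_supervision_pattern(pubs: List[Dict[str, Any]], candidate_norm: str, first_author_names: List[str]) -> str:
--     if not pubs:
--         return "insufficient_data"
--     last_author_count = sum(1 for p in pubs if p.get("candidate_authorship_role") == "last_author")
--     first_author_repeats = Counter(first_author_names)
--     repeated_first = len([1 for _, c in first_author_repeats.items() if c >= 2])
--     if last_author_count >= 2 and repeated_first >= 1: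
--         return "possible_student_supervisor_pattern"
--     if last_author_count >= 1:
--         return "possible_senior_guidance_pattern"
--     return "not_detected"
-- ===== SOURCE B (Python) =====
-- def _possible_supervision_pattern(pubs, candidate_norm, first_author_names):
--     if not pubs:
--         return "insufficient_data"
--     # saturating counter with early exit: we never need more than 2
--     seniority = 0
--     for p in pubs:
--         if p.get("candidate_authorship_role") == "last_author":
--             seniority += 1
--             if seniority == 2:
--                 break
--     if seniority == 0:
--         return "not_detected"
--     if seniority == 1:
--         return "possible_senior_guidance_pattern"
--     # seniority saturated at 2: look for a repeated first author by
--     # sorting and scanning adjacent pairs (no frequency table)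
--     names = sorted(first_author_names)
--     for a, b in zip(names, names[1:]):
--         if a == b:
--             return "possible_student_supervisor_pattern"
--     return "possible_senior_guidance_pattern"
-- ===== Notes on version B (the rewrite author's own statement) =====
-- stated objective: alternative
-- what changed: Replaces A's full count plus Counter frequency table by a saturating early-exit scan of pubs (stops at 2 last-author roles), a dispatch on the saturated value 0/1/2, and duplicate detection done only when needed via sort-then-adjacent-pair scan instead of per-name counts.
import Mathlib
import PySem

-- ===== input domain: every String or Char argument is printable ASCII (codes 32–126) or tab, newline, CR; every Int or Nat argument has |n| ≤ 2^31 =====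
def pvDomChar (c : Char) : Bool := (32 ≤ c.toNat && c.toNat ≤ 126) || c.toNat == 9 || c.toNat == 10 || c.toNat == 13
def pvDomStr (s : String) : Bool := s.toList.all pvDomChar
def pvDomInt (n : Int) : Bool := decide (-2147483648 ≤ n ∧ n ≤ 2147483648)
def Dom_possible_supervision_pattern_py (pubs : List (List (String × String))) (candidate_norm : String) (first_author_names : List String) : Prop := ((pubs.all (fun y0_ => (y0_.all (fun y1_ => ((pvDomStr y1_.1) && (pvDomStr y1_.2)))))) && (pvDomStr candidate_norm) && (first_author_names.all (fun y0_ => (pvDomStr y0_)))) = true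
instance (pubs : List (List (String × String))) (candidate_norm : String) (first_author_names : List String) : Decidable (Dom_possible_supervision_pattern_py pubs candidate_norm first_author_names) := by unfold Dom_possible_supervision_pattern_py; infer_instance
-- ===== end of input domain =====

-- B replaces the full count + Counter table by a saturating early-exit scan and a
-- sort-then-adjacent-scan duplicate test (objective: alternative algorithm).

-- ===== PORT A =====
-- A: guard on empty, count last-author roles by a filtered comprehension sum,
-- build a Counter of first authors, count entries with multiplicity >= 2.
def possible_supervision_pattern_py (pubs : List (List (String × String))) (candidate_norm : String) (first_author_names : List String) : String :=
  if pubs = [] then "insufficient_data"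
  else
    let last_author_count : Int :=
      ((pubs.filter (fun p => (PySem.Dict.mk p).get? "candidate_authorship_role" == some "last_author")).map
        (fun _ => (1 : Int))).sum
    let first_author_repeats := PySem.Dict.counter first_author_names
    let repeated_first : Int :=
      ((((first_author_repeats.items).filter (fun kc => decide (2 ≤ kc.2))).map (fun _ => (1 : Int))).length : Int)
    if 2 ≤ last_author_count ∧ 1 ≤ repeated_first then "possible_student_supervisor_pattern"
    else if 1 ≤ last_author_count then "possible_senior_guidance_pattern"
    else "not_detected"

-- ===== PORT B =====
-- B's loop over pubs with `break` once the counter reaches 2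
def pvCapLoop : List (List (String × String)) → Int → Int
  | [], s => s
  | p :: ps, s =>
    if (PySem.Dict.mk p).get? "candidate_authorship_role" == some "last_author" then
      (if s + 1 == 2 then s + 1 else pvCapLoop ps (s + 1))
    else pvCapLoop ps s

-- B's `for a, b in zip(names, names[1:])` adjacent-pair scan with early return
def pvAdjDup : List String → Bool
  | a :: b :: t => a == b || pvAdjDup (b :: t)
  | _ => false

-- B: saturating early-exit count of last-author roles, dispatch on 0/1/2, and —
-- only in the saturated case — duplicate detection by sorting the names and
-- scanning adjacent pairs.
def possible_supervision_pattern_py_alt (pubs : List (List (String × String))) (candidate_norm : String) (first_author_names : List String) : String :=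
  if pubs = [] then "insufficient_data"
  else
    let seniority := pvCapLoop pubs 0
    if seniority = 0 then "not_detected"
    else if seniority = 1 then "possible_senior_guidance_pattern"
    else
      let names := PySem.List.sorted first_author_names (fun x => x) false
      if pvAdjDup names then "possible_student_supervisor_pattern"
      else "possible_senior_guidance_pattern"

-- ===== PRECONDITION & SPEC =====
def Spec_possible_supervision_pattern_py (pubs : List (List (String × String))) (candidate_norm : String) (first_author_names : List String) (out : String) : Prop := out = possible_supervision_pattern_py_alt pubs candidate_norm first_author_names
instance (pubs : List (List (String × String))) (candidate_norm : String) (first_author_names : List String) (out : String) : Decidable (Spec_possible_supervision_pattern_py pubs candidate_norm first_author_names out) := by unfold Spec_possible_supervision_pattern_py; infer_instance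

-- ===== CLAIM =====
def Claim_equal_possible_supervision_pattern_py : Prop := ∀ (pubs : List (List (String × String))) (candidate_norm : String) (first_author_names : List String), Dom_possible_supervision_pattern_py pubs candidate_norm first_author_names → Spec_possible_supervision_pattern_py pubs candidate_norm first_author_names (possible_supervision_pattern_py pubs candidate_norm first_author_names)

-- ===== LEMMAS AND PROOFS =====

-- A's count of last-author publications, as written in port A
def pvCntA (pubs : List (List (String × String))) : Int :=
  ((pubs.filter (fun p => (PySem.Dict.mk p).get? "candidate_authorship_role" == some "last_author")).map
    (fun _ => (1 : Int))).sum

theorem pvCntA_nonneg (pubs : List (List (String × String))) : 0 ≤ pvCntA pubs := by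
  induction pubs with
  | nil => simp [pvCntA]
  | cons p ps ih =>
    unfold pvCntA at *
    by_cases h : ((PySem.Dict.mk p).get? "candidate_authorship_role" == some "last_author") = true
    · simp only [List.filter_cons, h, if_pos, List.map_cons, List.sum_cons]; omega
    · simp only [List.filter_cons, h, Bool.false_eq_true, if_false]; exact ih

-- B's saturating loop equals min 2 (s + A's count)
theorem pvCapLoop_eq (pubs : List (List (String × String))) (s : Int) (h0 : 0 ≤ s) (h1 : s ≤ 1) :
    pvCapLoop pubs s = min 2 (s + pvCntA pubs) := by
  induction pubs generalizing s with
  | nil =>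
    simp only [pvCapLoop, pvCntA, List.filter_nil, List.map_nil, List.sum_nil, add_zero]
    omega
  | cons p ps ih =>
    have hnn := pvCntA_nonneg ps
    by_cases h : ((PySem.Dict.mk p).get? "candidate_authorship_role" == some "last_author") = true
    · have hc : pvCntA (p :: ps) = 1 + pvCntA ps := by
        unfold pvCntA; simp only [List.filter_cons, h, if_pos, List.map_cons, List.sum_cons]
      rw [hc]
      by_cases hs : s = 1
      · subst hs
        simp only [pvCapLoop, h, if_pos]
        norm_num
        omega
      · have hs0 : s = 0 := by omega
        subst hs0
        simp only [pvCapLoop, h, if_pos, show (0:Int) + 1 = 1 from by norm_num,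
          show (((1:Int)) == 2) = false from by decide, Bool.false_eq_true, if_false]
        rw [ih 1 (by omega) (by omega)]
        omega
    · have hc : pvCntA (p :: ps) = pvCntA ps := by
        unfold pvCntA; simp only [List.filter_cons, h, Bool.false_eq_true, if_false]
      simp only [pvCapLoop, h, Bool.false_eq_true, if_false, hc, ih s h0 h1]

-- on a ≤-sorted list, an adjacent duplicate exists iff the list has any duplicate
theorem pvAdjDup_iff (ys : List String) (hp : ys.Pairwise (· ≤ ·)) :
    pvAdjDup ys = true ↔ ¬ ys.Nodup := by
  induction ys with
  | nil => simp [pvAdjDup]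
  | cons a t ih =>
    cases t with
    | nil => simp [pvAdjDup]
    | cons b u =>
      rcases List.pairwise_cons.mp hp with ⟨hab, hrest⟩
      have hle : a ≤ b := hab b (List.mem_cons_self)
      by_cases heq : a = b
      · subst heq
        constructor
        · intro _ hnd
          exact (List.nodup_cons.mp hnd).1 List.mem_cons_self
        · intro _; simp [pvAdjDup]
      · have hmem : a ∉ b :: u := by
          intro hm
          rcases List.mem_cons.mp hm with h | h
          · exact heq h
          · have hbu : b ≤ a := (List.pairwise_cons.mp hrest).1 a h
            exact heq (le_antisymm hle hbu)
        have : pvAdjDup (a :: b :: u) = pvAdjDup (b :: u) := by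
          simp [pvAdjDup, heq]
        rw [this, ih hrest]
        simp [List.nodup_cons, hmem]

-- A's repeated-first count is ≥ 1 exactly when the names list has a duplicate
theorem repeated_iff (xs : List String) :
    (1 ≤ ((((PySem.Dict.counter xs).items).filter (fun kc => decide (2 ≤ kc.2))).map
      (fun _ => (1 : Int))).length) ↔ ¬ xs.Nodup := by
  rw [PySem.Dict.items_counter, List.length_map]
  constructor
  · intro h
    rcases List.exists_mem_of_length_pos (Nat.lt_of_lt_of_le Nat.zero_lt_one h) with ⟨kc, hkc⟩
    rw [List.mem_filter] at hkc
    rcases List.mem_map.mp hkc.1 with ⟨k, hk, rfl⟩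
    intro hnd
    have h1 := List.nodup_iff_count_le_one.mp hnd k
    have h2 : (2 : Int) ≤ ((xs.count k : Nat) : Int) := by simpa using hkc.2
    omega
  · intro h
    rcases (by simpa [List.nodup_iff_count_le_one, not_forall] using h :
        ∃ k, ¬ xs.count k ≤ 1) with ⟨k, hk⟩
    have hkmem : k ∈ xs := List.count_pos_iff.mp (by omega)
    have hmem : (k, ((xs.count k : Nat) : Int)) ∈ ((PySem.Set.ofList xs).map (fun k => (k, (xs.count k : Int)))).filter
        (fun kc => decide (2 ≤ kc.2)) := by
      rw [List.mem_filter]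
      refine ⟨List.mem_map.mpr ⟨k, (PySem.Set.mem_ofList xs k).mpr hkmem, rfl⟩, by simp; omega⟩
    have := List.length_pos_of_mem hmem
    omega

-- duplicate in the names iff adjacent duplicate in B's sorted names
theorem adj_sorted_iff (xs : List String) :
    pvAdjDup (PySem.List.sorted xs (fun x => x) false) = true ↔ ¬ xs.Nodup := by
  have hp : (PySem.List.sorted xs (fun x => x) false).Pairwise (· ≤ ·) :=
    PySem.List.sorted_pairwise xs (fun x => x)
  rw [pvAdjDup_iff _ hp]
  have := (PySem.List.sorted_perm xs (fun x => x) false).nodup_iff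
  tauto

-- ===== VERDICT =====
theorem possible_supervision_pattern_py_spec : Claim_equal_possible_supervision_pattern_py := by
  intro pubs candidate_norm first_author_names _
  unfold Spec_possible_supervision_pattern_py possible_supervision_pattern_py possible_supervision_pattern_py_alt
  by_cases hp : pubs = []
  · simp [hp]
  · have hcap := pvCapLoop_eq pubs 0 (by omega) (by omega)
    have hnn := pvCntA_nonneg pubs
    simp only [hp, if_false, zero_add] at *
    have hcnt : ((pubs.filter (fun p => (PySem.Dict.mk p).get? "candidate_authorship_role" == some "last_author")).map
        (fun _ => (1 : Int))).sum = pvCntA pubs := rfl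
    simp only [hcnt, hcap]
    by_cases h2 : 2 ≤ pvCntA pubs
    · have hm : min 2 (pvCntA pubs) = 2 := by omega
      rw [hm]
      norm_num
      have hAiff : (1 ≤ (((PySem.Dict.counter first_author_names).items).filter (fun kc => decide (2 ≤ kc.2))).length) ↔ ¬ first_author_names.Nodup := by
        simpa using repeated_iff first_author_names
      by_cases hdup : first_author_names.Nodup
      · have hB : pvAdjDup (PySem.List.sorted first_author_names (fun x => x) false) = false := by
          rw [Bool.eq_false_iff]
          intro hc
          exact (adj_sorted_iff first_author_names).mp hc hdup
        rw [hB, if_neg (fun hc => (hAiff.mp hc.2) hdup), if_pos (by omega)]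
        simp
      · have hB : pvAdjDup (PySem.List.sorted first_author_names (fun x => x) false) = true :=
          (adj_sorted_iff first_author_names).mpr hdup
        rw [hB, if_pos ⟨h2, hAiff.mpr hdup⟩]
        simp
    · by_cases h1 : 1 ≤ pvCntA pubs
      · have hv : pvCntA pubs = 1 := by omega
        have hm : min 2 (pvCntA pubs) = 1 := by omega
        rw [hm]
        rw [if_neg (fun hc => h2 hc.1), if_pos h1]
        norm_num
      · have hv : pvCntA pubs = 0 := by omega
        have hm : min 2 (pvCntA pubs) = 0 := by omega
        rw [hm]
        rw [if_neg (fun hc => h2 hc.1), if_neg h1]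
        simp
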